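-- pv_equiv track=rewrite | github.com/AxelClosas/retos-programacion-2023 | Retos/Reto #9 - HETEROGRAMA, ISOGRAMA Y PANGRAMA [Fácil]/python/axelclosas.py | es_isograma
-- ===== SOURCE A (Python) =====
-- def es_heterograma(frase):
--     lista_de_frecuencias = {}
--
--     for l in frase:
--         if l.lower() in lista_de_frecuencias.keys():
--             lista_de_frecuencias[l.lower()] += 1
--         else:
--             lista_de_frecuencias[l.lower()] = 1
--
--     for f in lista_de_frecuencias.values():
--         if f != 1:
--             return False
--
--     return True
--
-- def es_isograma(frase):
--     lista_de_frecuencias = {}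
--
--     for l in frase:
--         if l.lower() in lista_de_frecuencias.keys():
--             lista_de_frecuencias[l.lower()] += 1
--         else:
--             lista_de_frecuencias[l.lower()] = 1
--
--     def es_seg_orden():
--         for f in lista_de_frecuencias.values():
--             if f != 2:
--                 return False
--         return True
--
--     def es_tercer_orden():
--         for f in lista_de_frecuencias.values():
--             if f != 3:
--                 return False
--         return True
--
--     if es_heterograma(frase):
--         return f"{frase}: Isograma de Primer Orden o Heterograma"
--     elif es_seg_orden():
--         return f"{frase}: Isograma de Segundo Orden"
--     elif es_tercer_orden():
--         return f"{frase}: Isograma de Tercer Orden"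
--
--     return f"{frase}: La palabra o frase ingresada no es un Isograma"
-- ===== SOURCE B (Python) =====
-- def es_isograma(frase):
--     s = frase.lower()
--     if not s:
--         return f"{frase}: Isograma de Primer Orden o Heterograma"
--     k = s.count(s[0])
--     if k > 3 or any(s.count(c) != k for c in s):
--         return f"{frase}: La palabra o frase ingresada no es un Isograma"
--     nombres = {1: "Primer Orden o Heterograma", 2: "Segundo Orden", 3: "Tercer Orden"}
--     return f"{frase}: Isograma de {nombres[k]}"
-- ===== Notes on version B (the rewrite author's own statement) =====
-- stated objective: simpler
-- what changed: Drops the frequency dict entirely: B takes the count of the first lowered character as the candidate order and verifies with str.count that every character shares it, dispatching once through a name table, instead of A's dict-building plus three separate full value scans.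
import Mathlib
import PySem

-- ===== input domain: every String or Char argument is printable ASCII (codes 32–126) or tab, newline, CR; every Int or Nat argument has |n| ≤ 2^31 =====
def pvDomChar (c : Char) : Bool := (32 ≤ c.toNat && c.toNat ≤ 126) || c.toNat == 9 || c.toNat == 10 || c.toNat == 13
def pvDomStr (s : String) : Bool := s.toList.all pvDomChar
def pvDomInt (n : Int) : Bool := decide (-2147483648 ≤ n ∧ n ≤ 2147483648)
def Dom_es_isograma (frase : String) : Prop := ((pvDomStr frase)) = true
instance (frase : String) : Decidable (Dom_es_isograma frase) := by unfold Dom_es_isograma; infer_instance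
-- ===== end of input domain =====

-- B drops A's frequency dict and its three value scans entirely: it takes the count of the
-- first lowered character as the candidate order and verifies every character shares that
-- count; simpler and shorter, not faster.

-- ===== PORT A =====
-- the frequency loop duplicated in es_heterograma and es_isograma (textually identical in A)
def pvFreqA (frase : String) : PySem.Dict Char Int :=
  frase.toList.foldl (fun d l =>
    if d.contains (PySem.Chars.lowerChar l) then
      d.insert (PySem.Chars.lowerChar l) (d.getD (PySem.Chars.lowerChar l) 0 + 1)
    else
      d.insert (PySem.Chars.lowerChar l) 1) PySem.Dict.empty

-- 'for f in values: if f != k: return False; return True' (A uses literals 1, 2, 3)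
def pvAllEq (vs : List Int) (k : Int) : Bool :=
  match vs with
  | [] => true
  | f :: rest => if f ≠ k then false else pvAllEq rest k

def es_heterograma (frase : String) : Bool :=
  pvAllEq (pvFreqA frase).values 1

def es_isograma (frase : String) : String :=
  let d := pvFreqA frase
  if es_heterograma frase then
    frase ++ ": Isograma de Primer Orden o Heterograma"
  else if pvAllEq d.values 2 then
    frase ++ ": Isograma de Segundo Orden"
  else if pvAllEq d.values 3 then
    frase ++ ": Isograma de Tercer Orden"
  else
    frase ++ ": La palabra o frase ingresada no es un Isograma"

-- ===== PORT B =====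
def es_isograma_alt (frase : String) : String :=
  let s := PySem.Chars.lower frase.toList
  if s.isEmpty then
    frase ++ ": Isograma de Primer Orden o Heterograma"
  else
    let k := s.count (PySem.List.pyGetD s 0 ' ')
    if k > 3 || s.any (fun c => s.count c ≠ k) then
      frase ++ ": La palabra o frase ingresada no es un Isograma"
    else
      -- nombres[k]: the guard guarantees 1 ≤ k ≤ 3, so getD's default is unreachable
      let nombres : PySem.Dict Nat String := PySem.Dict.ofList
        [(1, "Primer Orden o Heterograma"), (2, "Segundo Orden"), (3, "Tercer Orden")]
      frase ++ ": Isograma de " ++ nombres.getD k ""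

-- ===== PRECONDITION & SPEC =====
def Spec_es_isograma (frase : String) (out : String) : Prop := out = es_isograma_alt frase
instance (frase : String) (out : String) : Decidable (Spec_es_isograma frase out) := by unfold Spec_es_isograma; infer_instance

-- ===== CLAIM (what is proved, stated in full; the proofs are below) =====
def Claim_equal_es_isograma : Prop := ∀ (frase : String), Dom_es_isograma frase → Spec_es_isograma frase (es_isograma frase)

-- ===== LEMMAS AND PROOFS =====

-- B's counting step is A's branch on membership
theorem pvModify_step (d : PySem.Dict Char Int) (k : Char) :
    d.modify k 0 (· + 1)
      = if d.contains k then d.insert k (d.getD k 0 + 1) else d.insert k 1 := by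
  by_cases h : d.contains k = true
  · simp [PySem.Dict.modify, h]
  · have h0 : d.getD k 0 = 0 := by
      simp [PySem.Dict.getD,
        (PySem.Dict.get?_eq_none_iff_contains d k).2 (Bool.eq_false_iff.2 h)]
    simp [PySem.Dict.modify, h, h0]

theorem pvFold_eq (l : List Char) (d : PySem.Dict Char Int) :
    l.foldl (fun d x =>
        if d.contains (PySem.Chars.lowerChar x) then
          d.insert (PySem.Chars.lowerChar x) (d.getD (PySem.Chars.lowerChar x) 0 + 1)
        else d.insert (PySem.Chars.lowerChar x) 1) d
      = (l.map PySem.Chars.lowerChar).foldl (fun d x => d.modify x 0 (· + 1)) d := by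
  induction l generalizing d with
  | nil => rfl
  | cons x xs ih =>
    simp only [List.foldl_cons, List.map_cons]
    rw [pvModify_step]
    exact ih _

-- A's frequency dict is the counter of the lowered character list
theorem pvFreqA_counter (frase : String) :
    pvFreqA frase = PySem.Dict.counter (PySem.Chars.lower frase.toList) := by
  unfold pvFreqA
  rw [pvFold_eq]
  rfl

-- A's value scan over the counter = 'every character's count is j'
theorem pvAllEq_counter_iff (l : List Char) (j : Int) :
    pvAllEq (PySem.Dict.counter l).values j = true ↔ ∀ c ∈ l, (l.count c : Int) = j := by
  have hall : ∀ vs : List Int, pvAllEq vs j = true ↔ ∀ f ∈ vs, f = j := by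
    intro vs
    induction vs with
    | nil => simp [pvAllEq]
    | cons f rest ih => by_cases h : f = j <;> simp [pvAllEq, h, ih]
  rw [hall]
  rw [PySem.Dict.values_eq_map_keys _ (PySem.Dict.nodup_keys_counter l) 0]
  rw [PySem.Dict.keys_counter]
  constructor
  · intro h c hc
    exact h ((l.count c : Int)) (List.mem_map.2 ⟨c, (PySem.Set.mem_ofList _ _).2 hc, by
      rw [PySem.Dict.getD_counter]⟩)
  · intro h v hv
    obtain ⟨c, hc, rfl⟩ := List.mem_map.1 hv
    rw [PySem.Dict.getD_counter]
    exact h c ((PySem.Set.mem_ofList _ _).1 hc)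

-- the full dispatch, for an arbitrary lowered list l
theorem pvDispatch (frase : String) (l : List Char) :
    (if pvAllEq (PySem.Dict.counter l).values 1 = true then
       frase ++ ": Isograma de Primer Orden o Heterograma"
     else if pvAllEq (PySem.Dict.counter l).values 2 = true then
       frase ++ ": Isograma de Segundo Orden"
     else if pvAllEq (PySem.Dict.counter l).values 3 = true then
       frase ++ ": Isograma de Tercer Orden"
     else frase ++ ": La palabra o frase ingresada no es un Isograma")
  = (if l.isEmpty then
       frase ++ ": Isograma de Primer Orden o Heterograma"
     else
       let k := l.count (PySem.List.pyGetD l 0 ' ')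
       if k > 3 || l.any (fun c => l.count c ≠ k) then
         frase ++ ": La palabra o frase ingresada no es un Isograma"
       else
         let nombres : PySem.Dict Nat String := PySem.Dict.ofList
           [(1, "Primer Orden o Heterograma"), (2, "Segundo Orden"), (3, "Tercer Orden")]
         frase ++ ": Isograma de " ++ nombres.getD k "") := by
  cases l with
  | nil => rfl
  | cons c0 rest =>
    have hhead : PySem.List.pyGetD (c0 :: rest) 0 ' ' = c0 := by
      simp [PySem.List.pyGetD_zero_cons]
    simp only [hhead, List.isEmpty_cons, Bool.false_eq_true, if_false]
    have hc0 : c0 ∈ c0 :: rest := by simp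
    have hk0pos : 1 ≤ (c0 :: rest).count c0 := List.count_pos_iff.2 hc0
    by_cases huni : ∀ c ∈ c0 :: rest, (c0 :: rest).count c = (c0 :: rest).count c0
    · have hany : ((c0 :: rest).any fun c =>
          decide ((c0 :: rest).count c ≠ (c0 :: rest).count c0)) = false := by
        simp only [List.any_eq_false]
        intro c hc
        simp [huni c hc]
      have hiff : ∀ j : Int, pvAllEq (PySem.Dict.counter (c0 :: rest)).values j = true ↔
          j = ((c0 :: rest).count c0 : Int) := by
        intro j
        rw [pvAllEq_counter_iff]
        constructor
        · intro h; exact (h c0 hc0).symm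
        · intro h c hc
          rw [huni c hc, ← h]
      by_cases h1 : (c0 :: rest).count c0 = 1
      · have e1 : pvAllEq (PySem.Dict.counter (c0 :: rest)).values 1 = true :=
          (hiff 1).2 (by omega)
        have hcond : (decide ((c0 :: rest).count c0 > 3) || (c0 :: rest).any fun c =>
            decide ((c0 :: rest).count c ≠ (c0 :: rest).count c0)) = false := by
          rw [hany]; simp [h1]
        simp only [h1] at hcond
        simp only [e1, if_true, h1, hcond, Bool.false_eq_true, if_false]
        have hstr : ": Isograma de Primer Orden o Heterograma" = ": Isograma de " ++ (PySem.Dict.ofList [(1, "Primer Orden o Heterograma"), (2, "Segundo Orden"), (3, "Tercer Orden")] : PySem.Dict Nat String).getD 1 "" := by decide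
        rw [String.append_assoc]
        exact congrArg (fun t => frase ++ t) hstr
      · have e1 : pvAllEq (PySem.Dict.counter (c0 :: rest)).values 1 = false := by
          rw [Bool.eq_false_iff]; intro h; have := (hiff 1).1 h; omega
        by_cases h2 : (c0 :: rest).count c0 = 2
        · have e2 : pvAllEq (PySem.Dict.counter (c0 :: rest)).values 2 = true :=
            (hiff 2).2 (by omega)
          have hcond : (decide ((c0 :: rest).count c0 > 3) || (c0 :: rest).any fun c =>
              decide ((c0 :: rest).count c ≠ (c0 :: rest).count c0)) = false := by
            rw [hany]; simp [h2]
          simp only [h2] at hcond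
          simp only [e1, e2, if_true, h2, hcond, Bool.false_eq_true, if_false]
          have hstr : ": Isograma de Segundo Orden" = ": Isograma de " ++ (PySem.Dict.ofList [(1, "Primer Orden o Heterograma"), (2, "Segundo Orden"), (3, "Tercer Orden")] : PySem.Dict Nat String).getD 2 "" := by decide
          rw [String.append_assoc]
          exact congrArg (fun t => frase ++ t) hstr
        · have e2 : pvAllEq (PySem.Dict.counter (c0 :: rest)).values 2 = false := by
            rw [Bool.eq_false_iff]; intro h; have := (hiff 2).1 h; omega
          by_cases h3 : (c0 :: rest).count c0 = 3
          · have e3 : pvAllEq (PySem.Dict.counter (c0 :: rest)).values 3 = true :=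
              (hiff 3).2 (by omega)
            have hcond : (decide ((c0 :: rest).count c0 > 3) || (c0 :: rest).any fun c =>
                decide ((c0 :: rest).count c ≠ (c0 :: rest).count c0)) = false := by
              rw [hany]; simp [h3]
            simp only [h3] at hcond
            simp only [e1, e2, e3, if_true, h3, hcond, Bool.false_eq_true, if_false]
            have hstr : ": Isograma de Tercer Orden" = ": Isograma de " ++ (PySem.Dict.ofList [(1, "Primer Orden o Heterograma"), (2, "Segundo Orden"), (3, "Tercer Orden")] : PySem.Dict Nat String).getD 3 "" := by decide
            rw [String.append_assoc]
            exact congrArg (fun t => frase ++ t) hstr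
          · have e3 : pvAllEq (PySem.Dict.counter (c0 :: rest)).values 3 = false := by
              rw [Bool.eq_false_iff]; intro h; have := (hiff 3).1 h; omega
            have hcond : (decide ((c0 :: rest).count c0 > 3) || (c0 :: rest).any fun c =>
                decide ((c0 :: rest).count c ≠ (c0 :: rest).count c0)) = true := by
              have hd : decide ((c0 :: rest).count c0 > 3) = true :=
                decide_eq_true (by omega)
              rw [hd, Bool.true_or]
            simp only [e1, e2, e3, Bool.false_eq_true, if_false, hcond, if_true]
    · rw [not_forall] at huni
      simp only [not_forall, exists_prop] at huni
      obtain ⟨c, hc, hcne⟩ := huni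
      have hany : ((c0 :: rest).any fun c =>
          decide ((c0 :: rest).count c ≠ (c0 :: rest).count c0)) = true := by
        exact List.any_eq_true.2 ⟨c, hc, decide_eq_true hcne⟩
      have hfalse : ∀ j : Int, pvAllEq (PySem.Dict.counter (c0 :: rest)).values j = false := by
        intro j
        rw [Bool.eq_false_iff]
        intro h
        rw [pvAllEq_counter_iff] at h
        have h0 := h c0 hc0
        have hcc := h c hc
        exact hcne (by omega)
      have hcond : (decide ((c0 :: rest).count c0 > 3) || (c0 :: rest).any fun c =>
          decide ((c0 :: rest).count c ≠ (c0 :: rest).count c0)) = true := by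
        rw [hany, Bool.or_true]
      simp only [hfalse, Bool.false_eq_true, if_false, hcond, if_true]

-- ===== VERDICT (by name: the statement is the Claim_ definition above) =====
theorem es_isograma_spec : Claim_equal_es_isograma := by
  intro frase _
  unfold Spec_es_isograma es_isograma es_isograma_alt es_heterograma
  rw [pvFreqA_counter]
  exact pvDispatch frase (PySem.Chars.lower frase.toList)
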